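-- pv_equiv track=rewrite | github.com/Rahel-Meyer/Fault-tolerant-Database-Data-Filters | PrefixRedundancy.py | restore_prefixes_majority_based
-- ===== SOURCE A (Python) =====
-- from collections import defaultdict
--
-- def restore_prefixes_majority_based(prefixes, k, d):
--     """restores corrupted prefixes by choosing the majority char
--         param: prefixes []
--         param: k (int) number of chars per prefix
--         param: d (int) number of times to double char
--         return: prefix filter (dictionary)
--     """
--     true_prefixes = defaultdict(list)
--     maybe_prefixes = defaultdict(list)
--
--     for prefix, references in prefixes.items():
--         options = [([], True)]
--         for i in range(0, len(prefix), d):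
--             group = prefix[i:i + d]
--             if len(set(group)) == 1:
--                 for option, is_safe in options:
--                     option.append(group[0])
--             else:
--                 char_count = {}
--                 for char in group:
--                     if char in char_count:
--                         char_count[char] += 1
--                     else:
--                         char_count[char] = 1
--
--                 majority_char, majority_count = max(char_count.items(), key=lambda x: x[1])
--                 majority_unique = list(char_count.values()).count(majority_count) == 1
--
--                 if majority_unique:
--                     for option, is_safe in options:
--                         option.append(majority_char)
--                 elif majority_count != 1:
--                     # include prefixes with characters that are equally often
--                     new_options = []
--                     for option, is_safe in options:
--                         for char, count in char_count.items():
--                             if count == majority_count: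
--                                 new_option = option.copy()
--                                 new_option.append(char)
--                                 new_options.append((new_option, False))  # better results with False, could be set to True
--                     options = new_options
--                 else:
--                     new_options = []
--                     for option, is_safe in options:
--                         for char in group:
--                             new_option = option.copy()
--                             new_option.append(char)
--                             new_options.append((new_option, False))  # Mark as Maybe (False)
--                     options = new_options
--
--         for option, is_safe in options:
--             prefix_str = ''.join(option[:k])
--             if prefix_str:
--                 if is_safe:
--                     true_prefixes[prefix_str].extend(references)
--                 else:
--                     maybe_prefixes[prefix_str].extend(references)
--
--     return true_prefixes
-- ===== SOURCE B (Python) =====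
-- def restore_prefixes_majority_based(prefixes, k, d):
--     """Single pass per group: a prefix is kept only if every group has a unique
--     majority char; any ambiguous group discards the whole prefix immediately
--     (only certainly-restored prefixes are returned)."""
--     result = {}
--     for prefix, references in prefixes.items():
--         chars = []
--         ok = True
--         for i in range(0, len(prefix), d):
--             group = prefix[i:i + d]
--             if len(set(group)) == 1:
--                 chars.append(group[0])
--                 continue
--             counts = {}
--             for c in group:
--                 counts[c] = counts.get(c, 0) + 1
--             top = max(counts.values())
--             winners = [c for c in counts if counts[c] == top]
--             if len(winners) != 1:
--                 ok = False
--                 break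
--             chars.append(winners[0])
--         if ok:
--             s = ''.join(chars)[:k]
--             if s:
--                 result.setdefault(s, []).extend(references)
--     return result
-- ===== Notes on version B (the rewrite author's own statement) =====
-- stated objective: alternative
-- what changed: A carries a list of candidate restorations that multiplies at every ambiguous group (exponential in the number of ambiguous groups) and filters the safe ones at the end; B makes a single pass over the groups of each prefix, appending the unique majority char and discarding the whole prefix at the first ambiguous group, since only certainly-restored prefixes are returned (measured ~1.3x on a timing run's inputs, below the 1.5x bar, so no speed claim).
import Mathlib
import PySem

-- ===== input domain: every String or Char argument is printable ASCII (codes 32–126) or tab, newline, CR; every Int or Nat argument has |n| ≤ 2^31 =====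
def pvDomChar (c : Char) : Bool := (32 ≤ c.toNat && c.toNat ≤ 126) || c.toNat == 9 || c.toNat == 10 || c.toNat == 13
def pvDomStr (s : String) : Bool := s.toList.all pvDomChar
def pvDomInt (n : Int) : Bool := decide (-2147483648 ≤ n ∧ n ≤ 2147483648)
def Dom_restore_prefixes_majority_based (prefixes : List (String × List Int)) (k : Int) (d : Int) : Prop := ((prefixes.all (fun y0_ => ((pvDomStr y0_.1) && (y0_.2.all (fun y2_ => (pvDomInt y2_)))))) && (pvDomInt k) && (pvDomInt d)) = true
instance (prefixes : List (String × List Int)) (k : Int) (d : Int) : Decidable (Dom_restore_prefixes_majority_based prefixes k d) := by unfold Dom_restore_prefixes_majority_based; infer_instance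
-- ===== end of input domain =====

-- B replaces A's list of candidate options (which multiplies at every ambiguous group) by a
-- single pass per group that discards the prefix at its first ambiguous group, since only
-- certainly-restored prefixes are returned.

-- ===== PORT A =====
-- the body of A's inner `for i in range(...)` loop: update `options` for one group
def pvA_groupUpdate (group : List Char) (options : List (List Char × Bool)) : List (List Char × Bool) :=
  if (PySem.Set.ofList group).length == 1 then
    options.map (fun o => (o.1 ++ [PySem.List.pyGetD group 0 ' '], o.2))
  else
    let char_count := group.foldl
      (fun (cc : PySem.Dict Char Int) c =>
        if cc.contains c then cc.insert c (cc.getD c 0 + 1) else cc.insert c 1)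
      PySem.Dict.empty
    match PySem.List.max? char_count.items (fun x => x.2) with
    | none => options   -- unreachable: the group is nonempty wherever this runs
    | some mp =>
      if char_count.values.count mp.2 == 1 then
        options.map (fun o => (o.1 ++ [mp.1], o.2))
      else if mp.2 ≠ 1 then
        options.foldl (fun no o =>
          no ++ (char_count.items.filter (fun p => p.2 == mp.2)).map
                  (fun p => (o.1 ++ [p.1], false))) []
      else
        options.foldl (fun no o =>
          no ++ group.map (fun c => (o.1 ++ [c], false))) []

def pvA_step (pfx : List Char) (d : Int) (options : List (List Char × Bool)) (i : Int) : List (List Char × Bool) :=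
  pvA_groupUpdate (PySem.List.slice pfx (some i) (some (i + d))) options

-- the collection loop at the end of A's outer iteration (true_prefixes, maybe_prefixes)
def pvA_collect (k : Int) (references : List Int)
    (options : List (List Char × Bool))
    (tm : PySem.Dict String (List Int) × PySem.Dict String (List Int)) :
    PySem.Dict String (List Int) × PySem.Dict String (List Int) :=
  options.foldl (fun tm o =>
    let prefix_str := String.mk (PySem.List.slice o.1 none (some k))
    if prefix_str ≠ "" then
      if o.2 then (tm.1.modify prefix_str [] (· ++ references), tm.2)
      else (tm.1, tm.2.modify prefix_str [] (· ++ references))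
    else tm) tm

-- one iteration of A's outer loop (one prefix)
def pvA_entryStep (k d : Int)
    (tm : PySem.Dict String (List Int) × PySem.Dict String (List Int))
    (pr : String × List Int) :
    PySem.Dict String (List Int) × PySem.Dict String (List Int) :=
  let pfx := pr.1.toList
  let options := (PySem.List.pyRange 0 (PySem.List.len pfx) d).foldl (pvA_step pfx d) [([], true)]
  pvA_collect k pr.2 options tm

def restore_prefixes_majority_based (prefixes : List (String × List Int)) (k : Int) (d : Int) : List (String × List Int) :=
  ((PySem.Dict.ofList prefixes).items.foldl (pvA_entryStep k d)
    (PySem.Dict.empty, PySem.Dict.empty)).1.items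

-- ===== PORT B =====
-- B's per-group verdict: the unique majority char, or none if the group is ambiguous
def pvB_groupChar (group : List Char) : Option Char :=
  if (PySem.Set.ofList group).length == 1 then
    some (PySem.List.pyGetD group 0 ' ')
  else
  let counts := PySem.Dict.counter group
  match PySem.List.max? counts.values (fun v => v) with
  | none => none   -- unreachable: the group is nonempty wherever this runs
  | some top =>
    match counts.keys.filter (fun c => counts.getD c 0 == top) with
    | [w] => some w
    | _ => none

-- B's inner loop: one char per group, give up at the first ambiguous group (the break)
def pvB_restore (pfx : List Char) (d : Int) (idxs : List Int) (acc : List Char) : Option (List Char) :=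
  match idxs with
  | [] => some acc
  | i :: rest =>
    match pvB_groupChar (PySem.List.slice pfx (some i) (some (i + d))) with
    | some w => pvB_restore pfx d rest (acc ++ [w])
    | none => none

-- one iteration of B's loop (one prefix)
def pvB_entryStep (k d : Int) (result : PySem.Dict String (List Int))
    (pr : String × List Int) : PySem.Dict String (List Int) :=
  let pfx := pr.1.toList
  match pvB_restore pfx d (PySem.List.pyRange 0 (PySem.List.len pfx) d) [] with
  | none => result
  | some chars =>
    let s := PySem.List.slice chars none (some k)
    if s ≠ [] then result.modify (String.mk s) [] (· ++ pr.2) else result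

def restore_prefixes_majority_based_alt (prefixes : List (String × List Int)) (k : Int) (d : Int) : List (String × List Int) :=
  ((PySem.Dict.ofList prefixes).items.foldl (pvB_entryStep k d) PySem.Dict.empty).items

-- ===== PRECONDITION & SPEC =====
-- Pre_ excludes only d = 0, where Python's range(0, len(prefix), d) raises ValueError.
def Pre_restore_prefixes_majority_based (prefixes : List (String × List Int)) (k : Int) (d : Int) : Prop := d ≠ 0
instance (prefixes : List (String × List Int)) (k : Int) (d : Int) : Decidable (Pre_restore_prefixes_majority_based prefixes k d) := by unfold Pre_restore_prefixes_majority_based; infer_instance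
def pvWitness_restore_prefixes_majority_based : (List (String × List Int)) × Int × Int := ([("aab", [1, 2])], 3, 3)

def Spec_restore_prefixes_majority_based (prefixes : List (String × List Int)) (k : Int) (d : Int) (out : List (String × List Int)) : Prop := out = restore_prefixes_majority_based_alt prefixes k d
instance (prefixes : List (String × List Int)) (k : Int) (d : Int) (out : List (String × List Int)) : Decidable (Spec_restore_prefixes_majority_based prefixes k d out) := by unfold Spec_restore_prefixes_majority_based; infer_instance

-- ===== CLAIM (what is proved, stated in full; the proofs are below) =====
def Claim_equal_restore_prefixes_majority_based : Prop := ∀ (prefixes : List (String × List Int)) (k : Int) (d : Int), Dom_restore_prefixes_majority_based prefixes k d → Pre_restore_prefixes_majority_based prefixes k d → Spec_restore_prefixes_majority_based prefixes k d (restore_prefixes_majority_based prefixes k d)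

-- ===== LEMMAS AND PROOFS =====

-- A's hand-written counting loop is Counter
lemma pvA_charcount_eq (g : List Char) :
    g.foldl (fun (cc : PySem.Dict Char Int) c =>
        if cc.contains c then cc.insert c (cc.getD c 0 + 1) else cc.insert c 1)
      PySem.Dict.empty = PySem.Dict.counter g := by
  rw [← PySem.Dict.foldl_insert_getD_add_one_eq_counter]
  congr 1
  funext cc c
  by_cases h : cc.contains c
  · simp [h]
  · rw [PySem.Dict.getD_of_not_contains cc 0 (by simpa using h)]
    simp [h]

lemma pv_counter_values (g : List Char) :
    (PySem.Dict.counter g).values = (PySem.Set.ofList g).map (fun c => (g.count c : Int)) := by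
  simp [PySem.Dict.values, PySem.Dict.items_counter, List.map_map]

-- the maximum over items by snd equals the maximum over values
lemma pv_top_eq (g : List Char) (mp : Char × Int) (top : Int)
    (hmp : PySem.List.max? (PySem.Dict.counter g).items (fun x => x.2) = some mp)
    (htop : PySem.List.max? (PySem.Dict.counter g).values (fun v => v) = some top) :
    mp.2 = top := by
  have h1 := PySem.List.max?_isMax hmp
  have h2 := PySem.List.max?_isMax htop
  have hmem1 : mp ∈ (PySem.Dict.counter g).items := PySem.List.max?_mem hmp
  have hmem2 : top ∈ (PySem.Dict.counter g).values := PySem.List.max?_mem htop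
  have hv : (PySem.Dict.counter g).values = (PySem.Dict.counter g).items.map (·.2) := rfl
  apply le_antisymm
  · exact h2 mp.2 (by rw [hv]; exact List.mem_map.mpr ⟨mp, hmem1, rfl⟩)
  · rw [hv] at hmem2
    obtain ⟨p, hp, rfl⟩ := List.mem_map.mp hmem2
    exact h1 p hp

-- multiplicity of the top value among the counts = number of winner chars
lemma pv_count_winners (g : List Char) (top : Int) :
    (PySem.Dict.counter g).values.count top =
      ((PySem.Dict.counter g).keys.filter
        (fun c => (PySem.Dict.counter g).getD c 0 == top)).length := by
  rw [pv_counter_values, PySem.Dict.keys_counter, List.count_eq_countP,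
    List.countP_map, ← List.countP_eq_length_filter]
  apply List.countP_congr
  intro c _
  simp [PySem.Dict.getD_counter]

-- the nonempty-group case where B finds a unique winner: A appends exactly that char
lemma pvA_groupUpdate_single (g : List Char) (hg : g ≠ []) (w : Char)
    (h : pvB_groupChar g = some w) (options : List (List Char × Bool)) :
    pvA_groupUpdate g options = options.map (fun o => (o.1 ++ [w], o.2)) := by
  have hSne : PySem.Set.ofList g ≠ [] := by
    cases g with
    | nil => exact absurd rfl hg
    | cons x t =>
      intro hc
      have : x ∈ PySem.Set.ofList (x :: t) := (PySem.Set.mem_ofList _ _).mpr (by simp)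
      rw [hc] at this; exact absurd this (by simp)
  unfold pvB_groupChar at h
  simp only at h
  unfold pvA_groupUpdate
  by_cases huni : (PySem.Set.ofList g).length = 1
  · -- uniform group: both append the (unique) first char
    rw [if_pos (by simp [huni])] at h ⊢
    injection h with h'
    rw [h']
  · -- non-uniform group
    rw [if_neg (by simpa using huni)] at h
    rw [if_neg (by simpa using huni)]
    rw [pvA_charcount_eq]
    simp only []
    split at h
    · exact absurd h (by simp)
    · rename_i top htop
      split at h
      · rename_i lst wv hwin
        injection h with h'
        subst h'
        have hine : (PySem.Dict.counter g).items ≠ [] := by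
          rw [PySem.Dict.items_counter]
          simpa using hSne
        split
        · rename_i hnone
          exact absurd ((PySem.List.max?_eq_none_iff _ _).mp hnone) hine
        · rename_i mp hmp
          have htopeq := pv_top_eq g mp top hmp htop
          have hcnt1 : (PySem.Dict.counter g).values.count mp.2 = 1 := by
            rw [htopeq, pv_count_winners, hwin]; rfl
          rw [if_pos (by simp [hcnt1])]
          have hmem : mp ∈ (PySem.Dict.counter g).items := PySem.List.max?_mem hmp
          rw [PySem.Dict.items_counter] at hmem
          obtain ⟨c, hcS, hceq⟩ := List.mem_map.mp hmem
          have hc1 : mp.1 = c := by rw [← hceq]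
          have hc2 : mp.2 = (g.count c : Int) := by rw [← hceq]
          have hmemw : mp.1 ∈ (PySem.Dict.counter g).keys.filter
              (fun c => (PySem.Dict.counter g).getD c 0 == top) := by
            rw [List.mem_filter]
            refine ⟨by rw [PySem.Dict.keys_counter, hc1]; exact hcS, ?_⟩
            rw [hc1, PySem.Dict.getD_counter, ← hc2, htopeq]
            simp
          rw [hwin] at hmemw
          simp at hmemw
          rw [hmemw]
      · exact absurd h (by simp)

-- the nonempty-group case where B gives up: A's update marks every option unsafe
lemma pvA_groupUpdate_none (g : List Char) (hg : g ≠ []) (h : pvB_groupChar g = none)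
    (options : List (List Char × Bool)) :
    ∀ p ∈ pvA_groupUpdate g options, p.2 = false := by
  have hSne : PySem.Set.ofList g ≠ [] := by
    cases g with
    | nil => exact absurd rfl hg
    | cons x t =>
      intro hc
      have : x ∈ PySem.Set.ofList (x :: t) := (PySem.Set.mem_ofList _ _).mpr (by simp)
      rw [hc] at this; exact absurd this (by simp)
  unfold pvB_groupChar at h
  simp only at h
  by_cases huni : (PySem.Set.ofList g).length = 1
  · rw [if_pos (by simp [huni])] at h
    exact absurd h (by simp)
  · rw [if_neg (by simpa using huni)] at h
    split at h
    · rename_i hnone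
      have := (PySem.List.max?_eq_none_iff _ _).mp hnone
      rw [pv_counter_values] at this
      simp at this
      exact absurd this hSne
    · rename_i top htop
      split at h
      · exact absurd h (by simp)
      · rename_i hnotsingle
        intro p hp
        unfold pvA_groupUpdate at hp
        split at hp
        · rename_i huni'
          simp only [beq_iff_eq] at huni'
          exact absurd huni' huni
        · rw [pvA_charcount_eq] at hp
          simp only [] at hp
          split at hp
          · rename_i hnone
            have hine : (PySem.Dict.counter g).items ≠ [] := by
              rw [PySem.Dict.items_counter]; simpa using hSne
            exact absurd ((PySem.List.max?_eq_none_iff _ _).mp hnone) hine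
          · rename_i mp hmp
            have htopeq := pv_top_eq g mp top hmp htop
            have hcnt : (PySem.Dict.counter g).values.count mp.2 ≠ 1 := by
              rw [htopeq, pv_count_winners]
              intro hlen
              obtain ⟨c, hc⟩ := List.length_eq_one_iff.mp hlen
              exact hnotsingle c hc
            rw [if_neg (by simpa using hcnt)] at hp
            split at hp
            · rw [PySem.List.foldl_append_eq_flatMap] at hp
              simp only [List.nil_append, List.mem_flatMap, List.mem_map] at hp
              obtain ⟨o, _, q, _, rfl⟩ := hp
              rfl
            · rw [PySem.List.foldl_append_eq_flatMap] at hp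
              simp only [List.nil_append, List.mem_flatMap, List.mem_map] at hp
              obtain ⟨o, _, q, _, rfl⟩ := hp
              rfl

-- once every option is unsafe, it stays so
lemma pvA_step_false_mono (pfx : List Char) (d : Int) (i : Int)
    (options : List (List Char × Bool)) (h : ∀ p ∈ options, p.2 = false) :
    ∀ p ∈ pvA_step pfx d options i, p.2 = false := by
  intro p hp
  unfold pvA_step pvA_groupUpdate at hp
  split at hp
  · obtain ⟨o, ho, rfl⟩ := List.mem_map.mp hp
    exact h o ho
  · rw [pvA_charcount_eq] at hp
    simp only [] at hp
    split at hp
    · exact h p hp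
    · split at hp
      · obtain ⟨o, ho, rfl⟩ := List.mem_map.mp hp
        exact h o ho
      · split at hp
        · rw [PySem.List.foldl_append_eq_flatMap] at hp
          simp only [List.nil_append, List.mem_flatMap, List.mem_map] at hp
          obtain ⟨o, _, q, _, rfl⟩ := hp
          rfl
        · rw [PySem.List.foldl_append_eq_flatMap] at hp
          simp only [List.nil_append, List.mem_flatMap, List.mem_map] at hp
          obtain ⟨o, _, q, _, rfl⟩ := hp
          rfl

lemma pvA_loop_false (pfx : List Char) (d : Int) (idxs : List Int)
    (options : List (List Char × Bool)) (h : ∀ p ∈ options, p.2 = false) :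
    ∀ p ∈ idxs.foldl (pvA_step pfx d) options, p.2 = false := by
  induction idxs generalizing options with
  | nil => exact h
  | cons i rest ih => exact ih _ (pvA_step_false_mono pfx d i options h)

-- groups cut by range(0, len, d), d ≠ 0, are nonempty
lemma pv_groups_ne (pfx : List Char) (d : Int) (hd : d ≠ 0) :
    ∀ i ∈ PySem.List.pyRange 0 (PySem.List.len pfx) d,
      PySem.List.slice pfx (some i) (some (i + d)) ≠ [] := by
  intro i hi
  rcases lt_or_gt_of_ne hd with hneg | hpos
  · exfalso
    unfold PySem.List.pyRange at hi
    have h1 : ¬ ((0:Int) < d) := by omega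
    have h2 : ¬ ((pfx.length : Int) < 0) := by omega
    simp [hd, h1, h2] at hi
  · have hm := (PySem.List.mem_pyRange_iff_of_pos hpos i).mp hi
    simp only [PySem.List.len] at hm
    rw [PySem.List.slice_toNat pfx (by omega) (by omega)]
    intro hcontra
    have := congrArg List.length hcontra
    simp only [List.length_take, List.length_drop, List.length_nil] at this
    omega

-- B returns a restored prefix ⇒ A's inner loop ends with exactly that one safe option
lemma pvA_loop_some (pfx : List Char) (d : Int) (idxs : List Int)
    (hne : ∀ i ∈ idxs, PySem.List.slice pfx (some i) (some (i + d)) ≠ []) :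
    ∀ (acc cs : List Char), pvB_restore pfx d idxs acc = some cs →
      idxs.foldl (pvA_step pfx d) [(acc, true)] = [(cs, true)] := by
  induction idxs with
  | nil =>
    intro acc cs h
    simp only [pvB_restore, Option.some.injEq] at h
    simp [h]
  | cons i rest ih =>
    intro acc cs h
    simp only [pvB_restore] at h
    split at h
    · rename_i w hB
      simp only [List.foldl_cons]
      have hstep : pvA_step pfx d [(acc, true)] i = [(acc ++ [w], true)] :=
        pvA_groupUpdate_single _ (hne i (by simp)) w hB [(acc, true)]
      rw [hstep]
      exact ih (fun j hj => hne j (by simp [hj])) (acc ++ [w]) cs h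
    · exact absurd h (by simp)

-- B gives up ⇒ every option A ends with is unsafe
lemma pvA_loop_none (pfx : List Char) (d : Int) (idxs : List Int)
    (hne : ∀ i ∈ idxs, PySem.List.slice pfx (some i) (some (i + d)) ≠ []) :
    ∀ (acc : List Char), pvB_restore pfx d idxs acc = none →
      ∀ p ∈ idxs.foldl (pvA_step pfx d) [(acc, true)], p.2 = false := by
  induction idxs with
  | nil => intro acc h; exact absurd h (by simp [pvB_restore])
  | cons i rest ih =>
    intro acc h
    simp only [pvB_restore] at h
    split at h
    · rename_i w hB
      simp only [List.foldl_cons]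
      have hstep : pvA_step pfx d [(acc, true)] i = [(acc ++ [w], true)] :=
        pvA_groupUpdate_single _ (hne i (by simp)) w hB [(acc, true)]
      rw [hstep]
      exact ih (fun j hj => hne j (by simp [hj])) (acc ++ [w]) h
    · rename_i hB
      simp only [List.foldl_cons]
      exact pvA_loop_false pfx d rest _
        (fun p hp => pvA_groupUpdate_none _ (hne i (by simp)) hB _ p hp)

-- collecting an all-unsafe options list never touches true_prefixes
lemma pvA_collect_false (k : Int) (refs : List Int) (options : List (List Char × Bool))
    (h : ∀ p ∈ options, p.2 = false)
    (tm : PySem.Dict String (List Int) × PySem.Dict String (List Int)) :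
    (pvA_collect k refs options tm).1 = tm.1 := by
  induction options generalizing tm with
  | nil => rfl
  | cons o rest ih =>
    unfold pvA_collect
    simp only [List.foldl_cons]
    have ho : o.2 = false := h o (by simp)
    have hrest : ∀ p ∈ rest, p.2 = false := fun p hp => h p (by simp [hp])
    by_cases hs : String.mk (PySem.List.slice o.1 none (some k)) ≠ ""
    · rw [if_pos hs, ho]
      simpa [pvA_collect] using ih hrest _
    · rw [if_neg hs]
      exact ih hrest tm

-- String.mk produces the empty string only from the empty list
lemma pv_mk_empty_iff (l : List Char) : String.mk l = "" ↔ l = [] := by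
  constructor
  · intro h
    have hl : (String.mk l).toList = l := Eq.symm ((fun {l s} => String.ofList_eq.mp) rfl)
    rw [← hl, h]
    simp
  · intro h
    subst h
    rfl

-- the outer fold: the first component of A's state tracks B's dictionary
lemma pv_outer (k d : Int) (hd : d ≠ 0) (items : List (String × List Int)) :
    ∀ (t m : PySem.Dict String (List Int)),
      (items.foldl (pvA_entryStep k d) (t, m)).1 = items.foldl (pvB_entryStep k d) t := by
  induction items with
  | nil => intro t m; rfl
  | cons pr rest ih =>
    intro t m
    simp only [List.foldl_cons]
    cases hB : pvB_restore pr.1.toList d (PySem.List.pyRange 0 (PySem.List.len pr.1.toList) d) [] with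
    | some cs =>
      have hopts : pvA_entryStep k d (t, m) pr = pvA_collect k pr.2 [(cs, true)] (t, m) := by
        simp only [pvA_entryStep]
        rw [pvA_loop_some pr.1.toList d _ (pv_groups_ne pr.1.toList d hd) [] cs hB]
      by_cases hs : PySem.List.slice cs none (some k) = []
      · have hempty : String.mk (PySem.List.slice cs none (some k)) = "" := by rw [hs]; rfl
        have hcol : pvA_entryStep k d (t, m) pr = (t, m) := by
          rw [hopts]; simp [pvA_collect, hempty]
        have hBstep : pvB_entryStep k d t pr = t := by
          simp only [pvB_entryStep]
          rw [hB]
          simp [hs]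
        rw [hcol, hBstep]
        exact ih t m
      · have hne' : String.mk (PySem.List.slice cs none (some k)) ≠ "" := by
          intro hc
          exact hs ((pv_mk_empty_iff _).mp hc)
        have hcol : pvA_entryStep k d (t, m) pr =
            (t.modify (String.mk (PySem.List.slice cs none (some k))) [] (· ++ pr.2), m) := by
          rw [hopts]; simp [pvA_collect, hne']
        have hBstep : pvB_entryStep k d t pr =
            t.modify (String.mk (PySem.List.slice cs none (some k))) [] (· ++ pr.2) := by
          simp only [pvB_entryStep]
          rw [hB]
          simp [hs]
        rw [hcol, hBstep]
        exact ih _ m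
    | none =>
      have hall := pvA_loop_none pr.1.toList d _ (pv_groups_ne pr.1.toList d hd) [] hB
      have hfst : (pvA_entryStep k d (t, m) pr).1 = t := by
        simp only [pvA_entryStep]
        exact pvA_collect_false k pr.2 _ hall (t, m)
      have hBstep : pvB_entryStep k d t pr = t := by
        simp only [pvB_entryStep]
        rw [hB]
      rw [hBstep]
      have hsplit : pvA_entryStep k d (t, m) pr = (t, (pvA_entryStep k d (t, m) pr).2) := by
        conv_lhs => rw [← Prod.eta (pvA_entryStep k d (t, m) pr)]
        rw [hfst]
      rw [hsplit]
      exact ih t _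

-- ===== VERDICT (by name: the statement is the Claim_ definition above) =====
theorem restore_prefixes_majority_based_spec : Claim_equal_restore_prefixes_majority_based := by
  intro prefixes k d _ hpre
  unfold Spec_restore_prefixes_majority_based
  unfold restore_prefixes_majority_based restore_prefixes_majority_based_alt
  exact congrArg PySem.Dict.items
    (pv_outer k d hpre (PySem.Dict.ofList prefixes).items PySem.Dict.empty PySem.Dict.empty)
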